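-- pv_equiv track=rewrite | github.com/ovsartem1/project | 219_get_numbers.py | get_ulam_numbers
-- ===== SOURCE A (Python) =====
-- def get_ulam_numbers(roof: int) -> list:
--     """
--     Return a list of Ulam numbers up to roof (inclusive).
--     If roof is not an integer, return None.
--
--     >>> get_ulam_numbers(10)
--     [1, 2, 3, 4, 6, 8]
--     >>> get_ulam_numbers(1)
--     [1]
--     >>> get_ulam_numbers(0)
--     []
--     >>> get_ulam_numbers(-1)
--     []
--     >>> get_ulam_numbers('a')
--
--     """
--     if not isinstance(roof, int):
--         return None
--     else:
--         if roof <= 0: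
--             return []
--         if roof == 1:
--             return [1]
--         ulam_numbers = [1, 2]
--         while True:
--             sum_list = []
--             i = 0
--             while i < len(ulam_numbers):
--                 num1 = ulam_numbers[i]
--                 j = i + 1
--                 while j < len(ulam_numbers):
--                     num2 = ulam_numbers[j]
--                     sum_list.append(num1 + num2)
--                     j += 1
--                 i += 1
--             potential_number = sum_list[-1]
--             for num in sum_list[1:]:
--                 if ulam_numbers[-1] < num < potential_number:
--                     count = 0
--                     for sum_number in sum_list:
--                         if sum_number == num:
--                             count += 1
--                     if count == 1:
--                         potential_number = num
--             if potential_number > roof: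
--                 break
--             ulam_numbers.append(potential_number)
--
--         return ulam_numbers
-- ===== SOURCE B (Python) =====
-- def get_ulam_numbers(roof: int) -> list:
--     """Ulam numbers up to roof, keeping an incremental table of pairwise-sum
--     representation counts instead of rebuilding and rescanning the sum list."""
--     if not isinstance(roof, int):
--         return None
--     if roof <= 0:
--         return []
--     if roof == 1:
--         return [1]
--     ulam = [1, 2]
--     counts = {3: 1}          # counts[v] = number of pairs i<j with ulam[i]+ulam[j] == v
--     while True:
--         last = ulam[-1]
--         top = ulam[-2] + last          # sum of the two largest: always uniquely represented
--         nxt = top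
--         for v in range(last + 1, top):
--             if counts.get(v, 0) == 1:
--                 nxt = v
--                 break
--         if nxt > roof:
--             return ulam
--         for x in ulam:
--             counts[x + nxt] = counts.get(x + nxt, 0) + 1
--         ulam.append(nxt)
-- ===== Notes on version B (the rewrite author's own statement) =====
-- stated objective: faster
-- what changed: Instead of rebuilding the full pairwise-sum list every iteration and rescanning it to count representations of each candidate, B maintains an incremental dictionary of representation counts (updated with one pass per new Ulam number) and finds the successor by scanning candidate values upward from the last Ulam number.
import Mathlib
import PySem

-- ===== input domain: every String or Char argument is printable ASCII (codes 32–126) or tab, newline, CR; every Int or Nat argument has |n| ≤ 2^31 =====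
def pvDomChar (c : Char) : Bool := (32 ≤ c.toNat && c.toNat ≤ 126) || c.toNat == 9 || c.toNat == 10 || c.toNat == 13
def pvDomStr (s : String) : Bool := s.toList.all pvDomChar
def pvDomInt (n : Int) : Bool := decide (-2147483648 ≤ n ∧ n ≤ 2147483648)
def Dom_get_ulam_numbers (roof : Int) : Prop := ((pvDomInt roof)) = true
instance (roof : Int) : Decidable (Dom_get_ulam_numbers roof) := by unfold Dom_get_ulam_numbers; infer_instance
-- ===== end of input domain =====

-- B replaces A's rebuild-the-whole-sum-list-and-rescan-it-per-candidate step by an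
-- incrementally maintained table of pairwise-sum representation counts (objective: faster).

-- ===== PORT A =====
-- the two nested while loops building sum_list: for each i, append ulam[i]+ulam[j] for all j > i
def pvSumsA : List Int → List Int
  | [] => []
  | x :: rest => rest.map (fun y => x + y) ++ pvSumsA rest

-- the inner count loop: "count = 0; for sum_number in sum_list: if sum_number == num: count += 1"
def pvCountA (sl : List Int) (num : Int) : Int :=
  sl.foldl (fun c s => if s = num then c + 1 else c) 0

-- the "while True" loop; fuel guard only (the Python loop appends a strictly larger
-- number ≤ roof each iteration, so it always terminates within roof iterations)
def pvLoopA (roof : Int) : Nat → List Int → List Int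
  | 0, us => us
  | fuel + 1, us =>
    let sl := pvSumsA us
    match PySem.List.pyGet? sl (-1), PySem.List.pyGet? us (-1) with
    | some pot0, some lastU =>
      -- "for num in sum_list[1:]: if ulam[-1] < num < potential: … if count == 1: potential = num"
      let pot := (PySem.List.slice sl (some 1) none).foldl
        (fun pot num =>
          if lastU < num ∧ num < pot then
            (if pvCountA sl num = 1 then num else pot)
          else pot) pot0
      if pot > roof then us else pvLoopA roof fuel (us ++ [pot])
    | _, _ => us  -- unreachable: ulam_numbers always has ≥ 2 elements, so sum_list ≠ []

def get_ulam_numbers (roof : Int) : List Int :=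
  if roof ≤ 0 then []
  else if roof = 1 then [1]
  else pvLoopA roof roof.toNat [1, 2]

-- ===== PORT B =====
-- "for v in range(last + 1, top): if counts.get(v, 0) == 1: nxt = v; break" (nxt starts at top)
def pvScanB (counts : PySem.Dict Int Int) : List Int → Int → Int
  | [], dflt => dflt
  | v :: rest, dflt => if counts.getD v 0 = 1 then v else pvScanB counts rest dflt

-- B's "while True" loop over state (ulam, counts); same fuel guard as A's port
def pvLoopB (roof : Int) : Nat → List Int → PySem.Dict Int Int → List Int
  | 0, us, _ => us
  | fuel + 1, us, counts =>
    match PySem.List.pyGet? us (-1), PySem.List.pyGet? us (-2) with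
    | some lastU, some u2 =>
      let top := u2 + lastU
      let nxt := pvScanB counts (PySem.List.pyRange (lastU + 1) top) top
      if nxt > roof then us
      else
        pvLoopB roof fuel (us ++ [nxt])
          (us.foldl (fun d x => d.insert (x + nxt) (d.getD (x + nxt) 0 + 1)) counts)
    | _, _ => us  -- unreachable: ulam always has ≥ 2 elements

def get_ulam_numbers_alt (roof : Int) : List Int :=
  if roof ≤ 0 then []
  else if roof = 1 then [1]
  else pvLoopB roof roof.toNat [1, 2] (PySem.Dict.ofList [(3, 1)])

-- ===== PRECONDITION & SPEC =====
def Spec_get_ulam_numbers (roof : Int) (out : List Int) : Prop := out = get_ulam_numbers_alt roof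
instance (roof : Int) (out : List Int) : Decidable (Spec_get_ulam_numbers roof out) := by unfold Spec_get_ulam_numbers; infer_instance

-- ===== CLAIM (what is proved, stated in full; the proofs are below) =====
def Claim_equal_get_ulam_numbers : Prop := ∀ (roof : Int), Dom_get_ulam_numbers roof → Spec_get_ulam_numbers roof (get_ulam_numbers roof)

-- ===== LEMMAS AND PROOFS =====

-- the loop invariant relating the two states
def pvInv (us : List Int) (counts : PySem.Dict Int Int) : Prop :=
  (∃ rest, us = 1 :: 2 :: rest ∧ (rest = [] ∨ ∃ r, rest = 3 :: r))
  ∧ us.Pairwise (· < ·)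
  ∧ ∀ v, counts.getD v 0 = ((pvSumsA us).count v : Int)

lemma pvCountA_eq (sl : List Int) (num : Int) : pvCountA sl num = (sl.count num : Int) := by
  unfold pvCountA
  have hf : (fun (c : Int) s => if s = num then c + 1 else c)
      = (fun (c : Int) s => if ((fun s => s == num) s) = true then c + 1 else c) := by
    funext c s; simp
  rw [hf, PySem.List.foldl_count_if (fun s => s == num) sl 0]
  simp [List.count]

lemma pvSumsA_last (pre : List Int) (a b : Int) :
    (pvSumsA (pre ++ [a, b])).getLast? = some (a + b) := by
  induction pre with
  | nil => simp [pvSumsA]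
  | cons x pre ih =>
    show (((pre ++ [a, b]).map (fun y => x + y)) ++ pvSumsA (pre ++ [a, b])).getLast? = _
    rw [List.getLast?_append, ih]
    rfl

lemma pvSumsA_append_count (l : List Int) (n v : Int) :
    (pvSumsA (l ++ [n])).count v = (pvSumsA l).count v + (l.map (fun x => x + n)).count v := by
  induction l with
  | nil => simp [pvSumsA]
  | cons x l ih =>
    show ((l ++ [n]).map (fun y => x + y) ++ pvSumsA (l ++ [n])).count v = _
    rw [List.count_append, List.map_append, List.count_append, ih]
    show _ = (l.map (fun y => x + y) ++ pvSumsA l).count v + ((x :: l).map (fun y => y + n)).count v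
    rw [List.count_append]
    simp [List.count_cons, add_comm x n]
    omega

lemma pvFold_le (sl : List Int) (b : Int) (l : List Int) (p0 : Int) :
    l.foldl (fun pot num => if b < num ∧ num < pot then (if pvCountA sl num = 1 then num else pot) else pot) p0 ≤ p0 := by
  induction l generalizing p0 with
  | nil => simp
  | cons h t ih =>
    simp only [List.foldl_cons]
    refine le_trans (ih _) ?_
    split_ifs <;> omega

lemma pvFold_char (sl : List Int) (b : Int) (l : List Int) (p0 : Int) :
    (l.foldl (fun pot num => if b < num ∧ num < pot then (if pvCountA sl num = 1 then num else pot) else pot) p0 = p0)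
    ∨ (let P := l.foldl (fun pot num => if b < num ∧ num < pot then (if pvCountA sl num = 1 then num else pot) else pot) p0
       P ∈ l ∧ pvCountA sl P = 1 ∧ b < P ∧ P < p0) := by
  induction l generalizing p0 with
  | nil => exact Or.inl rfl
  | cons h t ih =>
    simp only [List.foldl_cons]
    rcases ih (if b < h ∧ h < p0 then (if pvCountA sl h = 1 then h else p0) else p0) with heq | ⟨hm, hc, hb, hp⟩
    · rw [heq]
      split_ifs with h1 h2
      · exact Or.inr ⟨List.mem_cons_self, h2, h1.1, h1.2⟩
      · exact Or.inl rfl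
      · exact Or.inl rfl
    · refine Or.inr ⟨List.mem_cons_of_mem _ hm, hc, hb, lt_of_lt_of_le hp ?_⟩
      split_ifs <;> omega

lemma pvFold_min (sl : List Int) (b : Int) (l : List Int) (p0 num : Int)
    (hm : num ∈ l) (hc : pvCountA sl num = 1) (hb : b < num) (hp : num < p0) :
    l.foldl (fun pot num => if b < num ∧ num < pot then (if pvCountA sl num = 1 then num else pot) else pot) p0 ≤ num := by
  induction l generalizing p0 with
  | nil => cases hm
  | cons h t ih =>
    simp only [List.foldl_cons]
    rcases List.mem_cons.1 hm with rfl | hmt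
    · rw [if_pos ⟨hb, hp⟩, if_pos hc]
      exact pvFold_le sl b t num
    · by_cases hlt : num < (if b < h ∧ h < p0 then (if pvCountA sl h = 1 then h else p0) else p0)
      · exact ih _ hmt hlt
      · rw [not_lt] at hlt
        refine le_trans (pvFold_le sl b t _) hlt

lemma pvScanB_char (counts : PySem.Dict Int Int) (vs : List Int) (dflt : Int) :
    pvScanB counts vs dflt = dflt ∨ (pvScanB counts vs dflt ∈ vs ∧ counts.getD (pvScanB counts vs dflt) 0 = 1) := by
  induction vs with
  | nil => exact Or.inl rfl
  | cons v rest ih =>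
    by_cases h : counts.getD v 0 = 1
    · simp only [pvScanB, if_pos h]
      exact Or.inr ⟨List.mem_cons_self, h⟩
    · simp only [pvScanB, if_neg h]
      rcases ih with h1 | ⟨h1, h2⟩
      · exact Or.inl h1
      · exact Or.inr ⟨List.mem_cons_of_mem _ h1, h2⟩

lemma pvScanB_min (counts : PySem.Dict Int Int) (vs : List Int) (dflt v : Int)
    (hs : vs.Pairwise (· < ·)) (hm : v ∈ vs) (hc : counts.getD v 0 = 1) :
    pvScanB counts vs dflt ≤ v := by
  induction vs with
  | nil => cases hm
  | cons w rest ih =>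
    show (if counts.getD w 0 = 1 then w else pvScanB counts rest dflt) ≤ v
    rcases List.mem_cons.1 hm with rfl | hmt
    · rw [if_pos hc]
    · by_cases h : counts.getD w 0 = 1
      · rw [if_pos h]
        exact le_of_lt ((List.pairwise_cons.1 hs).1 v hmt)
      · rw [if_neg h]
        exact ih (List.pairwise_cons.1 hs).2 hmt

lemma pvStep_eq (counts : PySem.Dict Int Int) (sl : List Int) (s0 b top : Int)
    (hsl : sl.head? = some s0) (hs0 : s0 ≤ b)
    (hcnt : ∀ v, counts.getD v 0 = (sl.count v : Int)) :
    sl.tail.foldl (fun pot num => if b < num ∧ num < pot then (if pvCountA sl num = 1 then num else pot) else pot) top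
      = pvScanB counts (PySem.List.pyRange (b + 1) top) top := by
  set P := sl.tail.foldl (fun pot num => if b < num ∧ num < pot then (if pvCountA sl num = 1 then num else pot) else pot) top with hP
  set Q := pvScanB counts (PySem.List.pyRange (b + 1) top) top with hQ
  obtain ⟨tl, hsl'⟩ : ∃ tl, sl = s0 :: tl := by
    cases sl with
    | nil => simp at hsl
    | cons x t => exact ⟨t, by simp at hsl; rw [hsl]⟩
  have hQchar := pvScanB_char counts (PySem.List.pyRange (b + 1) top) top
  have hPchar := pvFold_char sl b sl.tail top
  have hPle := pvFold_le sl b sl.tail top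
  apply le_antisymm
  · -- P ≤ Q
    rcases hQchar with hq | ⟨hqm, hqc⟩
    · rw [← hQ] at hq; rw [hq]; exact hPle
    rw [← hQ] at hqm hqc
    obtain ⟨hq1, hq2⟩ := PySem.List.mem_pyRange_one.1 hqm
    have hqcount : pvCountA sl Q = 1 := by
      rw [pvCountA_eq]
      have := hcnt Q
      omega
    have hqmem : Q ∈ sl := by
      have : sl.count Q ≠ 0 := by
        have := hcnt Q
        intro h0
        rw [h0] at this
        omega
      exact List.count_pos_iff.1 (Nat.pos_of_ne_zero this)
    have hqtail : Q ∈ sl.tail := by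
      rw [hsl'] at hqmem ⊢
      rcases List.mem_cons.1 hqmem with rfl | h
      · omega
      · exact h
    exact pvFold_min sl b sl.tail top Q hqtail hqcount (by omega) hq2
  · -- Q ≤ P
    rcases hPchar with hp | hp
    · rw [← hP] at hp; rw [hp]
      rcases hQchar with hq | ⟨hqm, _⟩
      · rw [← hQ] at hq; omega
      · rw [← hQ] at hqm
        exact le_of_lt (PySem.List.mem_pyRange_one.1 hqm).2
    · simp only [← hP] at hp
      obtain ⟨hpm, hpc, hpb, hpt⟩ := hp
      have hpr : P ∈ PySem.List.pyRange (b + 1) top := PySem.List.mem_pyRange_one.2 ⟨by omega, hpt⟩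
      have hpcnt : counts.getD P 0 = 1 := by
        rw [hcnt P, ← pvCountA_eq, hpc]
      exact pvScanB_min counts _ top P (PySem.List.pairwise_lt_pyRange_one _ _) hpr hpcnt


-- any list of length ≥ 2 splits off its last two elements
lemma pvTwoLast (l : List Int) (x y : Int) : ∃ pre a b, x :: y :: l = pre ++ [a, b] := by
  induction l generalizing x y with
  | nil => exact ⟨[], x, y, rfl⟩
  | cons z l ih =>
    obtain ⟨pre, a, b, h⟩ := ih y z
    exact ⟨x :: pre, a, b, by rw [List.cons_append, ← h]⟩

-- B's count-table update keeps the invariant's count equation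
lemma pvInv_step (us : List Int) (P : Int) (counts : PySem.Dict Int Int)
    (hcnt : ∀ v, counts.getD v 0 = ((pvSumsA us).count v : Int)) :
    ∀ v, (us.foldl (fun d x => d.insert (x + P) (d.getD (x + P) 0 + 1)) counts).getD v 0
      = ((pvSumsA (us ++ [P])).count v : Int) := by
  intro v
  have h1 : us.foldl (fun d x => d.insert (x + P) (d.getD (x + P) 0 + 1)) counts
      = (us.map (fun x => x + P)).foldl (fun d y => d.insert y (d.getD y 0 + 1)) counts := by
    rw [List.foldl_map]
  rw [h1, PySem.Dict.getD_foldl_insert_add_one, hcnt, pvSumsA_append_count]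
  push_cast
  ring

lemma pvLoop_eq (roof : Int) : ∀ (fuel : Nat) (us : List Int) (counts : PySem.Dict Int Int),
    pvInv us counts → pvLoopA roof fuel us = pvLoopB roof fuel us counts := by
  intro fuel
  induction fuel with
  | zero => intro us counts _; rfl
  | succ fuel ih =>
    intro us counts hinv
    obtain ⟨⟨rest, hus, hrest⟩, hpair, hcnt⟩ := hinv
    rcases hrest with hnil | ⟨r, hr⟩
    · -- first iteration: ulam = [1, 2]
      subst hnil; subst hus
      have hA : pvLoopA roof (fuel + 1) [1, 2]
          = if (3 : Int) > roof then [1, 2] else pvLoopA roof fuel [1, 2, 3] := rfl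
      have hB : pvLoopB roof (fuel + 1) [1, 2] counts
          = if (3 : Int) > roof then [1, 2]
            else pvLoopB roof fuel [1, 2, 3]
              ([1, 2].foldl (fun d x => d.insert (x + 3) (d.getD (x + 3) 0 + 1)) counts) := rfl
      rw [hA, hB]
      split_ifs
      · rfl
      · exact ih _ _ ⟨⟨[3], rfl, Or.inr ⟨[], rfl⟩⟩, by decide, pvInv_step [1, 2] 3 counts hcnt⟩
    · -- later iterations: ulam = 1 :: 2 :: 3 :: r
      subst hr; subst hus
      obtain ⟨pre, a, b, hsplit⟩ := pvTwoLast (3 :: r) 1 2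
      have hpair' : (pre ++ [a, b]).Pairwise (· < ·) := hsplit ▸ hpair
      have hub : ∀ x ∈ pre ++ [a], x < b := by
        have h2 : ((pre ++ [a]) ++ [b]).Pairwise (· < ·) := by
          simpa [List.append_assoc] using hpair'
        exact fun x hx => (List.pairwise_append.1 h2).2.2 x hx b (by simp)
      have h3b : (3 : Int) ≤ b := by
        have h3m : (3 : Int) ∈ (pre ++ [a]) ++ [b] := by
          have : (3 : Int) ∈ pre ++ [a, b] := by rw [← hsplit]; simp
          simpa [List.append_assoc] using this
        rcases List.mem_append.1 h3m with h | h
        · exact le_of_lt (hub 3 h)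
        · simp at h; omega
      have ha1 : (1 : Int) ≤ a := by
        have ham : a ∈ (1 : Int) :: 2 :: 3 :: r := by rw [hsplit]; simp
        rcases List.mem_cons.1 ham with h | h
        · omega
        · exact le_of_lt ((List.pairwise_cons.1 hpair).1 a h)
      have hf1 : PySem.List.pyGet? ((1 : Int) :: 2 :: 3 :: r) (-1) = some b := by
        rw [PySem.List.pyGet?_neg_one, hsplit]
        simp [List.getLast?_append]
      have hf2 : PySem.List.pyGet? ((1 : Int) :: 2 :: 3 :: r) (-2) = some a := by
        rw [PySem.List.pyGet?_neg_ofNat _ 2 (by omega) (by simp), hsplit]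
        have hl : (pre ++ [a, b]).length - 2 = pre.length := by simp
        rw [hl, List.getElem?_append_right (Nat.le_refl _)]
        simp
      have hf3 : PySem.List.pyGet? (pvSumsA ((1 : Int) :: 2 :: 3 :: r)) (-1) = some (a + b) := by
        rw [PySem.List.pyGet?_neg_one, hsplit, pvSumsA_last]
      have hhead : (pvSumsA ((1 : Int) :: 2 :: 3 :: r)).head? = some 3 := by
        simp [pvSumsA]
      have hstep := pvStep_eq counts (pvSumsA ((1 : Int) :: 2 :: 3 :: r)) 3 b (a + b) hhead h3b hcnt
      set P := pvScanB counts (PySem.List.pyRange (b + 1) (a + b)) (a + b) with hPdef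
      have hbP : b < P := by
        rcases pvFold_char (pvSumsA ((1 : Int) :: 2 :: 3 :: r)) b
            (pvSumsA ((1 : Int) :: 2 :: 3 :: r)).tail (a + b) with h | h
        · rw [hstep] at h; omega
        · rw [hstep] at h; exact h.2.2.1
      have hxP : ∀ x ∈ (1 : Int) :: 2 :: 3 :: r, x < P := by
        intro x hx
        rw [hsplit] at hx
        have : x ∈ (pre ++ [a]) ++ [b] := by simpa [List.append_assoc] using hx
        rcases List.mem_append.1 this with h | h
        · exact lt_trans (hub x h) hbP
        · simp at h; omega
      show pvLoopA roof (fuel + 1) _ = pvLoopB roof (fuel + 1) _ counts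
      simp only [pvLoopA, pvLoopB, hf1, hf2, hf3, PySem.List.slice_from_one, hstep, ← hPdef]
      split_ifs
      · rfl
      · apply ih
        refine ⟨⟨3 :: (r ++ [P]), by simp, Or.inr ⟨r ++ [P], rfl⟩⟩, ?_, ?_⟩
        · refine List.pairwise_append.2 ⟨hpair, by simp, ?_⟩
          intro x hx y hy
          simp at hy
          subst hy
          exact hxP x hx
        · have := pvInv_step ((1 : Int) :: 2 :: 3 :: r) P counts hcnt
          simpa using this

-- ===== VERDICT (by name: the statement is the Claim_ definition above) =====
theorem get_ulam_numbers_spec : Claim_equal_get_ulam_numbers := by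
  intro roof _
  unfold Spec_get_ulam_numbers get_ulam_numbers get_ulam_numbers_alt
  split
  · rfl
  · split
    · rfl
    · exact pvLoop_eq roof roof.toNat [1, 2] (PySem.Dict.ofList [(3, 1)])
        ⟨⟨[], rfl, Or.inl rfl⟩, by decide, by
          intro v
          show (PySem.Dict.empty.insert 3 1).getD v 0 = _
          rw [PySem.Dict.getD_insert]
          by_cases h : v = 3
          · simp [h, pvSumsA]
          · simp [h, pvSumsA, List.count_cons]
            omega⟩
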